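-- pv_equiv track=rewrite | github.com/ysuzuki-qc/mt_rebuild | mt_quel_meas/mt_quel_meas/execute.py | extract_sweep_dims
-- ===== SOURCE A (Python) =====
-- from typing import Iterable, Any
--
-- def extract_sweep_dims(sweep_parameter: list[dict[str, Iterable]]):
--     num_axis = len(sweep_parameter)
--     axis_dims: list[int] = [
--         -1,
--     ] * num_axis
--     for axis_index, axis_dict in enumerate(sweep_parameter):
--         if len(axis_dict) == 0:
--             raise ValueError(f"Sweep axis {axis_dict} has empty parameter. Each axis must have at least one parameter")
--         for axis_param in axis_dict.values():
--             if axis_dims[axis_index] == -1: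
--                 axis_dims[axis_index] = len(axis_param)
--             else:
--                 if axis_dims[axis_index] != len(axis_param):
--                     raise ValueError(
--                         f"Sweep axis {axis_index}: {axis_dict} has different dimensions."
--                         "Iterable parameter must have the same dimension."
--                     )
--     return axis_dims
-- ===== SOURCE B (Python) =====
-- def extract_sweep_dims(sweep_parameter):
--     def go(rest, axis_index):
--         if not rest:
--             return []
--         axis_dict = rest[0]
--         if len(axis_dict) == 0:
--             raise ValueError(f"Sweep axis {axis_dict} has empty parameter. Each axis must have at least one parameter")
--         lens = [len(v) for v in axis_dict.values()]
--         if min(lens) != max(lens):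
--             raise ValueError(
--                 f"Sweep axis {axis_index}: {axis_dict} has different dimensions."
--                 "Iterable parameter must have the same dimension."
--             )
--         return [lens[0]] + go(rest[1:], axis_index + 1)
--     return go(sweep_parameter, 0)
-- ===== Notes on version B (the rewrite author's own statement) =====
-- stated objective: alternative
-- what changed: B is recursive instead of A's indexed iteration with a mutated -1-sentinel array: it recurses on the list of axes, validates each axis by comparing min and max of the list of value lengths (instead of A's per-element first-vs-rest sentinel comparison), and builds the result by consing the first length.
import Mathlib
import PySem

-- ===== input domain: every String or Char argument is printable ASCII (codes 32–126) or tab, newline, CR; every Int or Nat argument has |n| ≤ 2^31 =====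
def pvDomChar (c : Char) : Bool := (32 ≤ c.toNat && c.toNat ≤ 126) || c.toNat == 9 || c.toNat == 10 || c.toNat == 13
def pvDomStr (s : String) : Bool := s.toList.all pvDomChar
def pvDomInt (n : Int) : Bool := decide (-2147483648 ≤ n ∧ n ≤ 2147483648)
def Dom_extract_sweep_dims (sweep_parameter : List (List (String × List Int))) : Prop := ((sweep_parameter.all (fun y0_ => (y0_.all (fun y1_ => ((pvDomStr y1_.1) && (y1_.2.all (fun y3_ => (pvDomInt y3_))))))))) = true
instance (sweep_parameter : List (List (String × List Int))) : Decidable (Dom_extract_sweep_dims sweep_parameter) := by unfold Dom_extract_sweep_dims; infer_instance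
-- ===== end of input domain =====

-- B replaces A's indexed loop over a mutated -1-sentinel array by structural recursion on the axis
-- list with a min/max uniqueness check; both raise ValueError on empty axes / mismatched dimensions
-- (those inputs are outside Pre_).

-- ===== PORT A =====
-- A mutates only axis_dims[axis_index] during axis axis_index, so the per-index cell is ported as
-- the inner fold's accumulator (initial value -1, same branch order); the raise paths are outside Pre_.
def extract_sweep_dims (sweep_parameter : List (List (String × List Int))) : List Int :=
  sweep_parameter.map (fun axis_dict =>
    (PySem.Dict.ofList axis_dict).values.foldl
      (fun dim axis_param => if dim == -1 then (axis_param.length : Int) else dim) (-1))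

-- ===== PORT B =====
-- B's recursion on rest; lens[0] raises only on an empty axis (outside Pre_), so headD's default is
-- never reached under Pre_; the min≠max raise path is likewise outside Pre_.
def extract_sweep_dims_alt (sweep_parameter : List (List (String × List Int))) : List Int :=
  match sweep_parameter with
  | [] => []
  | axis_dict :: rest =>
    let lens := (PySem.Dict.ofList axis_dict).values.map (fun v => (v.length : Int))
    lens.headD 0 :: extract_sweep_dims_alt rest

-- ===== PRECONDITION & SPEC =====
-- Pre_ holds exactly where the Python A returns: every axis dict is nonempty and all of its values
-- have the same length (otherwise A raises ValueError, and so does B).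
def Pre_extract_sweep_dims (sweep_parameter : List (List (String × List Int))) : Prop :=
  (sweep_parameter.all (fun axis_dict =>
    let vals := (PySem.Dict.ofList axis_dict).values
    (!vals.isEmpty) && vals.all (fun v => v.length == (vals.headD []).length))) = true
instance (sweep_parameter : List (List (String × List Int))) : Decidable (Pre_extract_sweep_dims sweep_parameter) := by unfold Pre_extract_sweep_dims; infer_instance
def pvWitness_extract_sweep_dims : (List (List (String × List Int))) := [[("a", [1, 2]), ("b", [3, 4])], [("c", [5])]]
def Spec_extract_sweep_dims (sweep_parameter : List (List (String × List Int))) (out : List Int) : Prop := out = extract_sweep_dims_alt sweep_parameter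
instance (sweep_parameter : List (List (String × List Int))) (out : List Int) : Decidable (Spec_extract_sweep_dims sweep_parameter out) := by unfold Spec_extract_sweep_dims; infer_instance

-- ===== CLAIM =====
def Claim_equal_extract_sweep_dims : Prop := ∀ (sweep_parameter : List (List (String × List Int))), Dom_extract_sweep_dims sweep_parameter → Pre_extract_sweep_dims sweep_parameter → Spec_extract_sweep_dims sweep_parameter (extract_sweep_dims sweep_parameter)

-- ===== LEMMAS AND PROOFS =====

-- A's inner fold keeps any non-sentinel accumulator.
theorem foldl_dim_const (l : List (List Int)) (acc : Int) (h : acc ≠ -1) :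
    l.foldl (fun dim axis_param => if dim == -1 then (axis_param.length : Int) else dim) acc = acc := by
  induction l with
  | nil => rfl
  | cons v rest ih =>
    simp only [List.foldl_cons]
    rw [if_neg (by simpa using h)]
    exact ih

-- per-axis agreement: the sentinel fold lands on the head's length
theorem axis_eq (vals : List (List Int)) (hne : vals.isEmpty = false) :
    vals.foldl (fun dim axis_param => if dim == -1 then (axis_param.length : Int) else dim) (-1)
      = (vals.map (fun v => (v.length : Int))).headD 0 := by
  cases vals with
  | nil => simp at hne
  | cons v rest =>
    simp only [List.foldl_cons, beq_self_eq_true, if_true, List.map_cons, List.headD_cons]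
    exact foldl_dim_const rest (v.length : Int) (by omega)

-- ===== VERDICT =====
theorem extract_sweep_dims_spec : Claim_equal_extract_sweep_dims := by
  intro sp hdom hpre
  clear hdom
  unfold Spec_extract_sweep_dims
  unfold Pre_extract_sweep_dims at hpre
  induction sp with
  | nil => rfl
  | cons d rest ih =>
    simp only [List.all_cons, Bool.and_eq_true] at hpre
    have h1 := hpre.1
    simp only [Bool.not_eq_eq_eq_not, Bool.not_true] at h1
    simp only [extract_sweep_dims, extract_sweep_dims_alt, List.map_cons]
    rw [axis_eq _ h1.1]
    exact congrArg _ (ih hpre.2)
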